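-- pv_equiv track=rewrite | github.com/bingjunluo/ST-GridPool | prepare_inputs.py | find_best_grid
-- ===== SOURCE A (Python) =====
-- import math
--
-- def find_best_grid(num_images):
--     """
--     Finds the grid dimensions (rows and columns) that best fit the number of images,
--     minimizing the difference between rows and columns.
--
--     Args:
--     - num_images (int): The number of images to arrange in the grid.
--
--     Returns:
--     - best_rows (int): The optimal number of grid rows.
--     - best_cols (int): The optimal number of grid columns.
--     """
--     factors = []
--     for i in range(1, int(math.sqrt(num_images)) + 1):
--         if num_images % i == 0:
--             factors.append((i, num_images // i))
--
--     # Find the factor pair with minimal difference between rows and columns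
--     best_rows, best_cols = min(factors, key=lambda x: abs(x[0] - x[1]))
--
--     # Ensure that rows >= cols for consistency (optional)
--     if best_rows < best_cols:
--         best_rows, best_cols = best_cols, best_rows
--
--     return best_rows, best_cols
-- ===== SOURCE B (Python) =====
-- import math
--
-- def find_best_grid(num_images):
--     root = int(math.sqrt(num_images))
--     for i in range(root, 0, -1):
--         if num_images % i == 0:
--             return num_images // i, i
--     raise ValueError("num_images must be positive")
-- ===== Notes on version B (the rewrite author's own statement) =====
-- stated objective: simpler
-- what changed: Replaces 'collect all factor pairs up to sqrt, then min by |rows-cols| and swap' with a single downward scan from int(sqrt(n)) that returns (n//i, i) at the first divisor found, which is automatically the pair of minimal difference with rows >= cols.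
import Mathlib
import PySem

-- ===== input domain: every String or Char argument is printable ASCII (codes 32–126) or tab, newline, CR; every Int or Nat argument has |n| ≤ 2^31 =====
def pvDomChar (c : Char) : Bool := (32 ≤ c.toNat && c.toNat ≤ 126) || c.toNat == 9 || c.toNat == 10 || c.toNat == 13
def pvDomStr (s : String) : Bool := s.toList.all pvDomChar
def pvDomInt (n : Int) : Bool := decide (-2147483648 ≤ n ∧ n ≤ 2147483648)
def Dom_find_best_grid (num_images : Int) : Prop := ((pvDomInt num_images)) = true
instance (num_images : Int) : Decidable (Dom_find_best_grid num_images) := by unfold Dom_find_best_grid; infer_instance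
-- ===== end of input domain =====

-- B replaces A's "collect all factor pairs, min by |rows-cols|, swap" with a single downward
-- scan from int(sqrt(n)) returning at the first divisor (objective: simpler, same cost).


-- ===== PORT A =====
-- int(math.sqrt(num_images)) is ported as Nat.sqrt num_images.toNat: exact for the admitted
-- inputs (1 ≤ n ≤ 2^31, where the double sqrt truncates to the integer square root);
-- negative n (math domain error) is excluded by Pre_.
def find_best_grid (num_images : Int) : Int × Int :=
  let factors : List (Int × Int) :=
    (PySem.List.pyRange 1 ((Nat.sqrt num_images.toNat : Int) + 1) 1).foldl
      (fun acc i =>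
        if PySem.Int.mod num_images i == 0 then
          acc ++ [(i, PySem.Int.floordiv num_images i)]
        else acc) []
  match PySem.List.min? factors (fun x => |x.1 - x.2|) with
  | some (best_rows, best_cols) =>
      if best_rows < best_cols then (best_cols, best_rows) else (best_rows, best_cols)
  | none => (0, 0)   -- Python: min([]) raises ValueError (only when num_images = 0); outside Pre_

-- ===== PORT B =====
-- the downward loop 'for i in range(root, 0, -1)' as structural recursion on the counter
def find_best_grid_loop (num_images : Int) : Nat → Option (Int × Int)
  | 0 => none
  | Nat.succ k =>
      if PySem.Int.mod num_images ((k + 1 : Nat) : Int) == 0 then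
        some (PySem.Int.floordiv num_images ((k + 1 : Nat) : Int), ((k + 1 : Nat) : Int))
      else find_best_grid_loop num_images k

def find_best_grid_alt (num_images : Int) : Int × Int :=
  match find_best_grid_loop num_images (Nat.sqrt num_images.toNat) with
  | some p => p
  | none => (0, 0)   -- Python: fall-through raise ValueError (num_images = 0); outside Pre_

-- ===== PRECONDITION & SPEC =====
-- Pre_ excludes num_images ≤ 0, where A raises (ValueError: math domain error for n < 0,
-- min([]) for n = 0); B raises there too.
def Pre_find_best_grid (num_images : Int) : Prop := 1 ≤ num_images
instance (num_images : Int) : Decidable (Pre_find_best_grid num_images) := by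
  unfold Pre_find_best_grid; infer_instance

def pvWitness_find_best_grid : Int := 12

def Spec_find_best_grid (num_images : Int) (out : Int × Int) : Prop := out = find_best_grid_alt num_images
instance (num_images : Int) (out : Int × Int) : Decidable (Spec_find_best_grid num_images out) := by
  unfold Spec_find_best_grid; infer_instance

-- ===== CLAIM (what is proved, stated in full; the proofs are below) =====
def Claim_equal_find_best_grid : Prop := ∀ (num_images : Int), Dom_find_best_grid num_images → Pre_find_best_grid num_images → Spec_find_best_grid num_images (find_best_grid num_images)

-- ===== LEMMAS AND PROOFS =====

-- A's factor-collecting fold, cut off after the first m candidates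
def pvFactors (n : Int) (m : Nat) : List (Int × Int) :=
  (PySem.List.pyRange 1 ((m : Int) + 1) 1).foldl
    (fun acc i =>
      if PySem.Int.mod n i == 0 then
        acc ++ [(i, PySem.Int.floordiv n i)]
      else acc) []

theorem pvFactors_succ (n : Int) (m : Nat) :
    pvFactors n (m + 1) =
      if PySem.Int.mod n ((m + 1 : Nat) : Int) == 0 then
        pvFactors n m ++ [(((m + 1 : Nat) : Int), PySem.Int.floordiv n ((m + 1 : Nat) : Int))]
      else pvFactors n m := by
  unfold pvFactors
  rw [show ((m + 1 : Nat) : Int) + 1 = ((m : Int) + 1) + 1 by push_cast; ring,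
      PySem.List.pyRange_one_succ_right (by omega : (1 : Int) ≤ (m : Int) + 1),
      List.foldl_append]
  simp

theorem pvMin?_append_singleton {α κ : Type} [LT κ] [DecidableLT κ]
    (xs : List α) (key : α → κ) (x : α) :
    PySem.List.min? (xs ++ [x]) key =
      match PySem.List.min? xs key with
      | none => some x
      | some m => if key x < key m then some x else some m := by
  simp only [PySem.List.min?, List.foldl_append, List.foldl_cons, List.foldl_nil]
  rfl

-- for a divisor candidate 1 ≤ i with i*i ≤ n: i ≤ n // i
theorem pvLe_fdiv (n i : Int) (hi : 1 ≤ i) (hii : i * i ≤ n) :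
    i ≤ PySem.Int.floordiv n i := by
  rw [PySem.Int.floordiv_eq_ediv_of_pos (by omega)]
  exact (Int.le_ediv_iff_mul_le (by omega)).mpr hii

-- n // j ≤ n // i for 0 < i ≤ j (dividend n ≥ 0)
theorem pvFdiv_anti (n i j : Int) (hn : 0 ≤ n) (hi : 1 ≤ i) (hij : i ≤ j) :
    PySem.Int.floordiv n j ≤ PySem.Int.floordiv n i := by
  rw [PySem.Int.floordiv_eq_ediv_of_pos (by omega),
      PySem.Int.floordiv_eq_ediv_of_pos (by omega)]
  refine (Int.le_ediv_iff_mul_le (by omega : (0:Int) < i)).mpr ?_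
  calc n / j * i ≤ n / j * j := by
        have : 0 ≤ n / j := Int.ediv_nonneg hn (by omega)
        exact mul_le_mul_of_nonneg_left hij this
    _ ≤ n := Int.ediv_mul_le n (by omega)

-- the joint invariant of A's fold and B's downward loop
theorem pvInv (n : Int) (hn : 1 ≤ n) :
    ∀ m : Nat, (m : Int) * (m : Int) ≤ n →
      (∃ d : Nat, 1 ≤ d ∧ d ≤ m ∧ ((d : Int) ∣ n) ∧
        find_best_grid_loop n m = some (PySem.Int.floordiv n d, (d : Int)) ∧
        PySem.List.min? (pvFactors n m) (fun x => |x.1 - x.2|) =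
          some ((d : Int), PySem.Int.floordiv n d)) ∨
      ((∀ j : Nat, 1 ≤ j → j ≤ m → ¬ ((j : Int) ∣ n)) ∧
        find_best_grid_loop n m = none ∧ pvFactors n m = []) := by
  intro m
  induction m with
  | zero =>
      intro _
      right
      refine ⟨fun j h1 h2 => absurd (le_trans h1 h2) (by omega), rfl, ?_⟩
      unfold pvFactors
      rw [PySem.List.pyRange_one_eq_nil (by omega)]
      rfl
  | succ m ih =>
      intro hm
      have hm' : (m : Int) * (m : Int) ≤ n := by push_cast at hm ⊢; nlinarith
      have hkey : ∀ i : Int, 1 ≤ i → i * i ≤ n →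
          |i - PySem.Int.floordiv n i| = PySem.Int.floordiv n i - i := by
        intro i h1 h2
        have := pvLe_fdiv n i h1 h2
        rw [abs_sub_comm, abs_of_nonneg (by omega)]
      by_cases hdvd : ((m + 1 : Nat) : Int) ∣ n
      · left
        have hmod : (PySem.Int.mod n ((m + 1 : Nat) : Int) == 0) = true := by
          rw [beq_iff_eq, PySem.Int.mod_eq_zero_iff_dvd]; exact hdvd
        have hm1 : (1 : Int) ≤ ((m + 1 : Nat) : Int) := by omega
        have hmm : ((m + 1 : Nat) : Int) * ((m + 1 : Nat) : Int) ≤ n := by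
          push_cast at hm ⊢; nlinarith
        have hstep : find_best_grid_loop n (m + 1) =
            if PySem.Int.mod n ((m + 1 : Nat) : Int) == 0 then
              some (PySem.Int.floordiv n ((m + 1 : Nat) : Int), ((m + 1 : Nat) : Int))
            else find_best_grid_loop n m := rfl
        refine ⟨m + 1, by omega, le_refl _, hdvd, ?_, ?_⟩
        · rw [hstep, hmod]; rfl
        · rw [pvFactors_succ, if_pos hmod, pvMin?_append_singleton]
          rcases ih hm' with ⟨d, hd1, hd2, hddvd, _, hmin⟩ | ⟨_, _, hnil⟩
          · rw [hmin]
            have hd1' : (1 : Int) ≤ (d : Int) := by omega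
            have hdd : (d : Int) * (d : Int) ≤ n := by
              push_cast at hm ⊢
              have : (d : Int) ≤ (m : Int) := by exact_mod_cast hd2
              nlinarith
            have hlt : |((m + 1 : Nat) : Int) - PySem.Int.floordiv n ((m + 1 : Nat) : Int)| <
                |(d : Int) - PySem.Int.floordiv n (d : Int)| := by
              rw [hkey _ hm1 hmm, hkey _ hd1' hdd]
              have hmono := pvFdiv_anti n (d : Int) ((m + 1 : Nat) : Int) (by omega) hd1'
                (by push_cast; omega)
              have : (d : Int) < ((m + 1 : Nat) : Int) := by push_cast; omega
              omega
            exact if_pos hlt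
          · rw [hnil]; rfl
      · have hmod : (PySem.Int.mod n ((m + 1 : Nat) : Int) == 0) = false := by
          simp only [beq_eq_false_iff_ne, ne_eq, PySem.Int.mod_eq_zero_iff_dvd]; exact hdvd
        have hloop : find_best_grid_loop n (m + 1) = find_best_grid_loop n m := by
          rw [show find_best_grid_loop n (m + 1) =
              (if PySem.Int.mod n ((m + 1 : Nat) : Int) == 0 then
                some (PySem.Int.floordiv n ((m + 1 : Nat) : Int), ((m + 1 : Nat) : Int))
              else find_best_grid_loop n m) from rfl, hmod]
          rfl
        have hfac : pvFactors n (m + 1) = pvFactors n m := by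
          rw [pvFactors_succ, hmod]; rfl
        rcases ih hm' with ⟨d, hd1, hd2, hddvd, hA, hM⟩ | ⟨hnone, hA, hF⟩
        · exact Or.inl ⟨d, hd1, by omega, hddvd, by rw [hloop]; exact hA, by rw [hfac]; exact hM⟩
        · refine Or.inr ⟨?_, by rw [hloop]; exact hA, by rw [hfac]; exact hF⟩
          intro j h1 h2
          rcases Nat.lt_or_ge j (m + 1) with h | h
          · exact hnone j h1 (by omega)
          · have : j = m + 1 := by omega
            subst this; exact hdvd

-- ===== VERDICT (by name: the statement is the Claim_ definition above) =====
theorem find_best_grid_spec : Claim_equal_find_best_grid := by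
  intro n _ hpre
  unfold Spec_find_best_grid
  have hn : 1 ≤ n := hpre
  set r : Nat := Nat.sqrt n.toNat with hr
  have hrr : (r : Int) * (r : Int) ≤ n := by
    have h1 : r * r ≤ n.toNat := by
      have h := Nat.sqrt_le' n.toNat; rw [pow_two] at h; exact h
    have h2 : ((n.toNat : Int)) = n := Int.toNat_of_nonneg (by omega)
    calc (r : Int) * (r : Int) = ((r * r : Nat) : Int) := by push_cast; ring
      _ ≤ ((n.toNat : Nat) : Int) := by exact_mod_cast h1
      _ = n := h2
  have hr1 : 1 ≤ r := by
    have : 0 < n.toNat := by omega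
    exact Nat.sqrt_pos.mpr this
  rcases pvInv n hn r hrr with ⟨d, hd1, hd2, hddvd, hA, hM⟩ | ⟨hnone, _, _⟩
  · have hd1' : (1 : Int) ≤ (d : Int) := by exact_mod_cast hd1
    have hdd : (d : Int) * (d : Int) ≤ n := by
      have hdr : (d : Int) ≤ (r : Int) := by exact_mod_cast hd2
      nlinarith
    have hle : (d : Int) ≤ PySem.Int.floordiv n (d : Int) := pvLe_fdiv n _ hd1' hdd
    have hAeq : find_best_grid n =
        (match PySem.List.min? (pvFactors n r) (fun x => |x.1 - x.2|) with
          | some (a, b) => if a < b then (b, a) else (a, b)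
          | none => (0, 0)) := rfl
    have hBeq : find_best_grid_alt n =
        (match find_best_grid_loop n r with
          | some p => p
          | none => (0, 0)) := rfl
    rw [hAeq, hBeq, hM, hA]
    show (if (d : Int) < PySem.Int.floordiv n (d : Int) then
            (PySem.Int.floordiv n (d : Int), (d : Int))
          else ((d : Int), PySem.Int.floordiv n (d : Int))) =
        (PySem.Int.floordiv n (d : Int), (d : Int))
    by_cases hlt : (d : Int) < PySem.Int.floordiv n (d : Int)
    · rw [if_pos hlt]
    · have heq : (d : Int) = PySem.Int.floordiv n (d : Int) := by omega
      rw [if_neg hlt, ← heq]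
  · exact absurd (one_dvd n) (by exact_mod_cast hnone 1 le_rfl hr1)
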